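-- pv_equiv track=rewrite | github.com/Chopinsky/algo-problems | challenges/3499/3067+Count+Pairs+Connectable+Servers+Weighted+Tree+Network.py | countPairsOfConnectableServers
-- ===== SOURCE A (Python) =====
-- from typing import List
--
-- def countPairsOfConnectableServers(edges: List[List[int]], speed: int) -> List[int]:
--   n = len(edges)+1
--   nb = [[] for _ in range(n)]
--   ans = []
--
--   for u, v, w in edges:
--     nb[u].append((v, w))
--     nb[v].append((u, w))
--
--   def count_branch(u: int, wt: int, p: int):
--     cnt = 0
--     if wt % speed == 0:
--       cnt += 1
--
--     for v, w0 in nb[u]: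
--       if v == p:
--         continue
--
--       cnt += count_branch(v, wt+w0, u)
--
--     return cnt
--
--   def count(u: int) -> int:
--     pairs = 0
--     prefix = 0
--
--     for v, w in nb[u]:
--       c0 = count_branch(v, w, u)
--       pairs += prefix * c0
--       prefix += c0
--
--     return pairs
--
--   for i in range(n):
--     ans.append(count(i))
--
--   return ans
-- ===== SOURCE B (Python) =====
-- from typing import List
--
-- def countPairsOfConnectableServers(edges: List[List[int]], speed: int) -> List[int]:
--   n = len(edges) + 1
--   adj = [[] for _ in range(n)]
--   for u, v, w in edges:
--     adj[u].append((v, w))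
--     adj[v].append((u, w))
--
--   ans = []
--   for i in range(n):
--     total = 0
--     sq = 0
--     for v0, w0 in adj[i]:
--       # iterative DFS over this branch with an explicit stack
--       c = 0
--       stack = [(v0, w0, i)]
--       while stack:
--         u, wt, p = stack.pop()
--         if wt % speed == 0:
--           c += 1
--         for v, w in adj[u]:
--           if v != p:
--             stack.append((v, wt + w, u))
--       total += c
--       sq += c * c
--     ans.append((total * total - sq) // 2)
--   return ans
-- ===== Notes on version B (the rewrite author's own statement) =====
-- stated objective: alternative
-- what changed: Replaces A's per-branch recursive DFS with running prefix-product pair accumulation by an iterative explicit-stack DFS per branch and the closed-form combination (S*S - sum of squared branch counts) // 2.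
import Mathlib
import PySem

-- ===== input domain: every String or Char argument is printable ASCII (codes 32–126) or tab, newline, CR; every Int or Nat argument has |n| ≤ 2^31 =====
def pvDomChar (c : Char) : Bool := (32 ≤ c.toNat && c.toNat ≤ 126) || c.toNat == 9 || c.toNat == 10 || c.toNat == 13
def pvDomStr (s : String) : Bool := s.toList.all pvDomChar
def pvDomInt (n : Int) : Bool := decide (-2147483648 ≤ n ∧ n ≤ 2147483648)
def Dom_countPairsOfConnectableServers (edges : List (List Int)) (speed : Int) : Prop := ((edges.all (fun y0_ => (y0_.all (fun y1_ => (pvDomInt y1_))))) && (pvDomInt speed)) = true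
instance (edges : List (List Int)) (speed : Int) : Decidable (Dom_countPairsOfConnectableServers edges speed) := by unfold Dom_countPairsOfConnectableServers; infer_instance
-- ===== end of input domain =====

-- B replaces A's per-branch recursion + prefix-product pair accumulation by an explicit-stack
-- iterative DFS per branch combined with the closed form (S*S - Σ c_b^2) // 2: same cost, different decomposition.

-- ===== PORT A =====
-- nb[u].append(x)  (Python list indexing semantics)
def pvPushA (nb : List (List (Int × Int))) (i : Int) (x : Int × Int) : List (List (Int × Int)) :=
  PySem.List.pySetD nb i (PySem.List.pyGetD nb i [] ++ [x])

-- the 'for u, v, w in edges' adjacency-building loop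
def pvNbA (edges : List (List Int)) (n : Nat) : List (List (Int × Int)) :=
  edges.foldl (fun nb row =>
    match row with
    | [u, v, w] => pvPushA (pvPushA nb u (v, w)) v (u, w)
    | _ => nb) (List.replicate n [])

-- count_branch(u, wt, p); the fuel argument only totalises the recursion (Python has none)
def pvCountBranchA (nb : List (List (Int × Int))) (speed : Int) : Nat → Int → Int → Int → Int
  | 0, _, _, _ => 0
  | f + 1, u, wt, p =>
    let cnt : Int := if PySem.Int.mod wt speed = 0 then 1 else 0
    (PySem.List.pyGetD nb u []).foldl
      (fun cnt vw => if vw.1 = p then cnt else cnt + pvCountBranchA nb speed f vw.1 (wt + vw.2) u) cnt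

-- count(u): pairs/prefix accumulation over the branches of u
def pvCountA (nb : List (List (Int × Int))) (speed : Int) (fuel : Nat) (u : Int) : Int :=
  ((PySem.List.pyGetD nb u []).foldl
    (fun (st : Int × Int) vw =>
      let c0 := pvCountBranchA nb speed fuel vw.1 vw.2 u
      (st.1 + st.2 * c0, st.2 + c0)) (0, 0)).1

def countPairsOfConnectableServers (edges : List (List Int)) (speed : Int) : List Int :=
  let n := edges.length + 1
  let nb := pvNbA edges n
  (PySem.List.pyRange 0 n 1).foldl (fun ans i => ans ++ [pvCountA nb speed (3 * n * (3 * n) + 2) i]) []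

-- ===== PORT B =====
def pvPushB (adj : List (List (Int × Int))) (i : Int) (x : Int × Int) : List (List (Int × Int)) :=
  PySem.List.pySetD adj i (PySem.List.pyGetD adj i [] ++ [x])

def pvAdjB (edges : List (List Int)) (n : Nat) : List (List (Int × Int)) :=
  edges.foldl (fun adj row =>
    match row with
    | [u, v, w] => pvPushB (pvPushB adj u (v, w)) v (u, w)
    | _ => adj) (List.replicate n [])

-- largest adjacency-list length (only used by the termination measure of the stack loop)
def pvDeg (adj : List (List (Int × Int))) : Nat :=
  adj.foldl (fun m l => max m l.length) 0

lemma pvLen_le_pvDeg (adj : List (List (Int × Int))) (i : Int) :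
    (PySem.List.pyGetD adj i []).length ≤ pvDeg adj := by
  by_cases h : PySem.Raise.InRange adj.length i
  · have hm := PySem.List.pyGetD_mem adj ([] : List (Int × Int)) h
    have := (PySem.List.le_foldl_max (adj.map List.length) 0).2 _ (List.mem_map_of_mem hm)
    simpa [pvDeg, List.foldl_map] using this
  · rw [PySem.List.pyGetD_of_none _ _ _ ((PySem.List.pyGet?_eq_none_iff adj i).mpr h)]
    simp

-- the 'while stack:' loop of B; each stack entry is (u, wt, p, fuel), fuel only totalises the loop
def pvStackB (adj : List (List (Int × Int))) (speed : Int)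
    (stack : List (Int × Int × Int × Nat)) (c : Int) : Int :=
  match stack with
  | [] => c
  | (_, _, _, 0) :: rest => pvStackB adj speed rest c
  | (u, wt, p, f + 1) :: rest =>
    let c' := if PySem.Int.mod wt speed = 0 then c + 1 else c
    let kids := ((PySem.List.pyGetD adj u []).filter (fun vw => vw.1 ≠ p)).map
      (fun vw => (vw.1, wt + vw.2, u, f))
    pvStackB adj speed (kids.reverse ++ rest) c'
termination_by (stack.map (fun e => (pvDeg adj + 1) ^ e.2.2.2)).sum
decreasing_by
  · simp
  · simp only [List.map_append, List.sum_append, List.map_cons, List.sum_cons,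
      List.map_reverse, List.sum_reverse, List.map_map]
    have hlen : (((PySem.List.pyGetD adj u []).filter (fun vw => vw.1 ≠ p)).length) ≤ pvDeg adj :=
      le_trans (List.length_filter_le _ _) (pvLen_le_pvDeg adj u)
    have hsum : ((((PySem.List.pyGetD adj u []).filter (fun vw => vw.1 ≠ p)).map
        (fun _ => (pvDeg adj + 1) ^ f)).sum) ≤ pvDeg adj * (pvDeg adj + 1) ^ f := by
      rw [List.map_const', List.sum_replicate, smul_eq_mul]
      exact Nat.mul_le_mul_right _ hlen
    have hpow : pvDeg adj * (pvDeg adj + 1) ^ f < (pvDeg adj + 1) ^ (f + 1) := by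
      have : (pvDeg adj + 1) ^ (f + 1) = (pvDeg adj + 1) * (pvDeg adj + 1) ^ f := by ring
      rw [this]
      have hp : 0 < (pvDeg adj + 1) ^ f := pow_pos (Nat.succ_pos _) f
      nlinarith
    simp only [Function.comp_def, Nat.succ_eq_add_one] at *
    omega

-- per-root: branch counts via the stack DFS, then (total^2 - sq) // 2
def pvCountB (adj : List (List (Int × Int))) (speed : Int) (fuel : Nat) (i : Int) : Int :=
  let st := (PySem.List.pyGetD adj i []).foldl
    (fun (st : Int × Int) vw =>
      let c := pvStackB adj speed [(vw.1, vw.2, i, fuel)] 0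
      (st.1 + c, st.2 + c * c)) (0, 0)
  PySem.Int.floordiv (st.1 * st.1 - st.2) 2

def countPairsOfConnectableServers_alt (edges : List (List Int)) (speed : Int) : List Int :=
  let n := edges.length + 1
  let adj := pvAdjB edges n
  (PySem.List.pyRange 0 n 1).map (fun i => pvCountB adj speed (3 * n * (3 * n) + 2) i)

-- ===== PRECONDITION & SPEC =====
-- adjacency as the Pythons build it (own copy: Pre_ may not reference the ports)
def pvPushP (nb : List (List (Int × Int))) (i : Int) (x : Int × Int) : List (List (Int × Int)) :=
  PySem.List.pySetD nb i (PySem.List.pyGetD nb i [] ++ [x])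

def pvNbP (edges : List (List Int)) (n : Nat) : List (List (Int × Int)) :=
  edges.foldl (fun nb row =>
    match row with
    | [u, v, w] => pvPushP (pvPushP nb u (v, w)) v (u, w)
    | _ => nb) (List.replicate n [])

-- walk states (node, forbidden parent), with Python's raw labels; successors of a state
def pvStepP (nb : List (List (Int × Int))) (s : Int × Int) : List (Int × Int) :=
  ((PySem.List.pyGetD nb s.1 []).filter (fun vw => vw.1 ≠ s.2)).map (fun vw => (vw.1, s.1))

-- the states A's outer loop starts a branch walk from
def pvInitP (nb : List (List (Int × Int))) (n : Nat) : List (Int × Int) :=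
  (List.range n).flatMap (fun i => (PySem.List.pyGetD nb (i : Int) []).map (fun vw => (vw.1, (i : Int))))

-- reachable-state closure (fuel bounds the rounds; each round adds a new state or stops)
def pvReachP (nb : List (List (Int × Int))) : Nat → List (Int × Int) → List (Int × Int)
  | 0, R => R
  | k + 1, R =>
    let nxt := PySem.List.dedup ((R.flatMap (pvStepP nb)).filter (fun t => t ∉ R))
    if nxt = [] then R else pvReachP nb k (R ++ nxt)

-- repeatedly discard states with no live successor; the fixpoint is the set of states
-- from which an infinite parent-avoiding walk exists
def pvPruneP (nb : List (List (Int × Int))) : Nat → List (Int × Int) → List (Int × Int)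
  | 0, alive => alive
  | k + 1, alive =>
    let alive' := alive.filter (fun s => (pvStepP nb s).any (fun t => decide (t ∈ alive)))
    if alive'.length = alive.length then alive else pvPruneP nb k alive'

-- no reachable walk state lies on an infinite parent-avoiding walk (= A's recursion terminates)
def pvAcyclic (edges : List (List Int)) : Bool :=
  let n := edges.length + 1
  let nb := pvNbP edges n
  let R := pvReachP nb (3 * n * (3 * n) + 2) (PySem.List.dedup (pvInitP nb n))
  pvPruneP nb (R.length + 1) R = []

-- Pre_ = exactly the inputs on which Python A returns: it raises ZeroDivisionError when speed = 0
-- (unless edges is empty, where no distance is ever reduced), ValueError/IndexError on rows that are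
-- not [u, v, w] with -n <= u, v < n, and RecursionError when some parent-avoiding walk never ends.
def Pre_countPairsOfConnectableServers (edges : List (List Int)) (speed : Int) : Prop :=
  (edges = [] ∨ speed ≠ 0) ∧
  (∀ row ∈ edges, ∃ u v w : Int, row = [u, v, w] ∧
    -((edges.length : Int) + 1) ≤ u ∧ u < (edges.length : Int) + 1 ∧
    -((edges.length : Int) + 1) ≤ v ∧ v < (edges.length : Int) + 1) ∧
  pvAcyclic edges = true

instance (edges : List (List Int)) (speed : Int) :
    Decidable (Pre_countPairsOfConnectableServers edges speed) := by
  unfold Pre_countPairsOfConnectableServers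
  have : ∀ row : List Int, Decidable (∃ u v w : Int, row = [u, v, w] ∧
      -((edges.length : Int) + 1) ≤ u ∧ u < (edges.length : Int) + 1 ∧
      -((edges.length : Int) + 1) ≤ v ∧ v < (edges.length : Int) + 1) := by
    intro row
    match row with
    | [u, v, w] =>
      exact decidable_of_iff (-((edges.length : Int) + 1) ≤ u ∧ u < (edges.length : Int) + 1 ∧
          -((edges.length : Int) + 1) ≤ v ∧ v < (edges.length : Int) + 1)
        (by constructor
            · rintro ⟨h1, h2, h3, h4⟩; exact ⟨u, v, w, rfl, h1, h2, h3, h4⟩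
            · rintro ⟨u', v', w', heq, h⟩
              obtain ⟨rfl, rfl, rfl⟩ : u = u' ∧ v = v' ∧ w = w' := by
                injection heq with h1 t; injection t with h2 t; injection t with h3 _
                exact ⟨h1, h2, h3⟩
              exact h)
    | [] => exact isFalse (by rintro ⟨u, v, w, h, _⟩; simp at h)
    | [_] => exact isFalse (by rintro ⟨u, v, w, h, _⟩; simp at h)
    | [_, _] => exact isFalse (by rintro ⟨u, v, w, h, _⟩; simp at h)
    | _ :: _ :: _ :: _ :: _ => exact isFalse (by rintro ⟨u, v, w, h, _⟩; simp at h)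
  exact instDecidableAnd

def pvWitness_countPairsOfConnectableServers : List (List Int) × Int := ([[0, 1, 2], [1, 2, 4]], 2)

def Spec_countPairsOfConnectableServers (edges : List (List Int)) (speed : Int) (out : List Int) : Prop := out = countPairsOfConnectableServers_alt edges speed
instance (edges : List (List Int)) (speed : Int) (out : List Int) : Decidable (Spec_countPairsOfConnectableServers edges speed out) := by unfold Spec_countPairsOfConnectableServers; infer_instance

-- ===== CLAIM (what is proved, stated in full; the proofs are below) =====
def Claim_equal_countPairsOfConnectableServers : Prop := ∀ (edges : List (List Int)) (speed : Int), Dom_countPairsOfConnectableServers edges speed → Pre_countPairsOfConnectableServers edges speed → Spec_countPairsOfConnectableServers edges speed (countPairsOfConnectableServers edges speed)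

-- ===== LEMMAS AND PROOFS =====

-- A's skip-fold is the init plus the sum over the non-skipped neighbours
lemma pv_foldl_skip (p : Int) (g : Int × Int → Int) :
    ∀ (l : List (Int × Int)) (init : Int),
      l.foldl (fun acc vw => if vw.1 = p then acc else acc + g vw) init
        = init + ((l.filter (fun vw => vw.1 ≠ p)).map g).sum := by
  intro l
  induction l with
  | nil => simp
  | cons x xs ih =>
    intro init
    by_cases hx : x.1 = p <;> simp [hx, ih, add_assoc]

-- the stack loop totals the branch counts of its entries
lemma pvStackB_eq (adj : List (List (Int × Int))) (speed : Int) :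
    ∀ (stack : List (Int × Int × Int × Nat)) (c : Int),
      pvStackB adj speed stack c
        = c + (stack.map (fun e => pvCountBranchA adj speed e.2.2.2 e.1 e.2.1 e.2.2.1)).sum := by
  intro stack c
  fun_induction pvStackB adj speed stack c with
  | case1 c => simp
  | case2 rest c u wt p ih => simp [ih, pvCountBranchA]
  | case3 c u wt p f rest c' kids ih =>
    rw [ih]
    simp only [c', kids, List.map_append, List.sum_append, List.map_reverse, List.sum_reverse,
      List.map_map, Function.comp_def]
    have hcb : pvCountBranchA adj speed (f + 1) u wt p
        = (if PySem.Int.mod wt speed = 0 then (1 : Int) else 0)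
          + (((PySem.List.pyGetD adj u []).filter (fun vw => vw.1 ≠ p)).map
              (fun vw => pvCountBranchA adj speed f vw.1 (wt + vw.2) u)).sum := by
      rw [pvCountBranchA]
      exact pv_foldl_skip p (fun vw => pvCountBranchA adj speed f vw.1 (wt + vw.2) u) _ _
    simp only [List.map_cons, List.sum_cons, Nat.succ_eq_add_one, hcb]
    by_cases hmod : PySem.Int.mod wt speed = 0 <;> simp [hmod, add_assoc]

-- the two adjacency structures coincide
lemma pvAdj_eq (edges : List (List Int)) (n : Nat) : pvAdjB edges n = pvNbA edges n := rfl

-- arithmetic: prefix-product pair fold vs (S^2 - Σc^2)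
lemma pv_pairs_fold (cs : List Int) :
    ∀ p s : Int,
      2 * (cs.foldl (fun (st : Int × Int) c => (st.1 + st.2 * c, st.2 + c)) (p, s)).1
        = 2 * p + (s + cs.sum) ^ 2 - s ^ 2 - (cs.map (fun c => c * c)).sum := by
  induction cs with
  | nil => intro p s; simp
  | cons c cs ih =>
    intro p s
    have := ih (p + s * c) (s + c)
    simp only [List.foldl_cons, List.map_cons, List.sum_cons] at *
    rw [this]; ring

lemma pv_sumsq_fold (cs : List Int) :
    ∀ t q : Int,
      cs.foldl (fun (st : Int × Int) c => (st.1 + c, st.2 + c * c)) (t, q)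
        = (t + cs.sum, q + (cs.map (fun c => c * c)).sum) := by
  induction cs with
  | nil => intro t q; simp
  | cons c cs ih => intro t q; simp [ih, add_assoc]

lemma pvCount_eq (adj : List (List (Int × Int))) (speed : Int) (fuel : Nat) (i : Int) :
    pvCountB adj speed fuel i = pvCountA adj speed fuel i := by
  unfold pvCountB pvCountA
  have hB : ∀ vw : Int × Int, pvStackB adj speed [(vw.1, vw.2, i, fuel)] 0
      = pvCountBranchA adj speed fuel vw.1 vw.2 i := by
    intro vw
    rw [pvStackB_eq]
    simp
  simp only [hB]
  have hA := pv_pairs_fold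
    ((PySem.List.pyGetD adj i []).map (fun vw => pvCountBranchA adj speed fuel vw.1 vw.2 i)) 0 0
  have hQ := pv_sumsq_fold
    ((PySem.List.pyGetD adj i []).map (fun vw => pvCountBranchA adj speed fuel vw.1 vw.2 i)) 0 0
  rw [List.foldl_map] at hA hQ
  rw [hQ]
  rw [PySem.Int.floordiv_eq_ediv_of_pos (by norm_num : (0:Int) < 2)]
  simp only [List.map_map, Function.comp_def, zero_add, pow_two, mul_zero,
    sub_zero] at hA ⊢
  omega

-- ===== VERDICT (by name: the statement is the Claim_ definition above) =====
theorem countPairsOfConnectableServers_spec : Claim_equal_countPairsOfConnectableServers := by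
  intro edges speed _ _
  unfold Spec_countPairsOfConnectableServers
  unfold countPairsOfConnectableServers countPairsOfConnectableServers_alt
  rw [PySem.List.foldl_append_singleton_eq_map]
  simp only [pvAdj_eq, List.nil_append]
  exact List.map_congr_left (fun i _ => (pvCount_eq _ _ _ i).symm)
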